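-- pv_equiv track=rewrite | github.com/Ashafix/pcr | cgi_bin/nucleotide_tools.py | is_valid_fasta
-- ===== SOURCE A (Python) =====
-- def is_valid_fasta(sequence):
--     """
--     checks if a FASTA file is correct
--     """
--     header = False  # indicates whether a header was found
--     sequence = sequence.strip()
--     if not sequence.startswith('>'):
--         return False
--     fasta_lines = sequence.split('\n')
--     if len(fasta_lines) < 2:
--         return False
--     for fasta_line in fasta_lines:
--         if fasta_line.startswith('>'):
--             if header:
--                 return False
--             header = True
--         else:
--             if not header:
--                 return False
--             header = False
--             fasta_line = fasta_line.upper()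
--             if not all(nuc in 'ATGC\n\r' for nuc in fasta_line):
--                 return False
--     return True
-- ===== SOURCE B (Python) =====
-- def _is_seq_line(line):
--     return all(nuc in 'ATGC\n\r' for nuc in line.upper())
--
--
-- def is_valid_fasta(sequence):
--     """
--     checks if a FASTA file is correct
--     """
--     sequence = sequence.strip()
--     if not sequence.startswith('>'):
--         return False
--     lines = sequence.split('\n')
--     if len(lines) < 2:
--         return False
--     it = iter(lines)
--     for head in it:
--         if not head.startswith('>'):
--             return False
--         body = next(it, None)
--         if body is not None and not _is_seq_line(body):
--             return False
--     return True
-- ===== Notes on version B (the rewrite author's own statement) =====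
-- stated objective: alternative
-- what changed: The stateful header/sequence toggle flag with per-line branching is replaced by a pairwise consumer that takes lines two at a time (header, then optional sequence body), so no boolean state is carried across iterations.
import Mathlib
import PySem

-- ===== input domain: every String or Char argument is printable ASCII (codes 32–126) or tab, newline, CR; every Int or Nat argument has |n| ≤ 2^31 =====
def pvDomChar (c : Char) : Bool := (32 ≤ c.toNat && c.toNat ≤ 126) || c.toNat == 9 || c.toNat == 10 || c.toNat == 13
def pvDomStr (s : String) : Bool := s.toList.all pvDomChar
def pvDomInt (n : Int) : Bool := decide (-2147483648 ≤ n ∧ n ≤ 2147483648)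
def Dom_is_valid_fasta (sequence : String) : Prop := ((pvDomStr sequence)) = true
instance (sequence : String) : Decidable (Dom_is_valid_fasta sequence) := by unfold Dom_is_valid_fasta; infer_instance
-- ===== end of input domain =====

-- B replaces A's header-toggle state machine by a loop that consumes a header line and its
-- optional body line two at a time, carrying no boolean state (objective: alternative, same cost).

-- ===== PORT A =====
-- A's for-loop with early returns and the `header` flag; `nuc in 'ATGC\n\r'` is char
-- membership among the string's characters, ported exactly as membership in "ATGC\n\r".toList.
def pvLoopA : List (List Char) → Bool → Bool
  | [], _ => true
  | fasta_line :: ls, header =>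
    if PySem.Chars.startswith fasta_line ['>'] then
      if header then false else pvLoopA ls true
    else
      if !header then false
      else
        let u := PySem.Chars.upper fasta_line
        if !(u.all (fun nuc => nuc ∈ "ATGC\n\r".toList)) then false
        else pvLoopA ls false

def is_valid_fasta (sequence : String) : Bool :=
  let s := (PySem.Str.strip sequence).toList
  if !PySem.Chars.startswith s ['>'] then false
  else
    let fasta_lines := PySem.Chars.splitOn s ['\n']
    if fasta_lines.length < 2 then false
    else pvLoopA fasta_lines false

-- ===== PORT B =====
-- Source B's _is_seq_line helper
def pvIsSeqLine (line : List Char) : Bool :=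
  (PySem.Chars.upper line).all (fun nuc => nuc ∈ "ATGC\n\r".toList)

-- Source B's for-over-iterator: each step takes `head` and, via next(it, None), an optional `body`
def pvPairLoop : List (List Char) → Bool
  | [] => true
  | [head] => PySem.Chars.startswith head ['>']  -- next(it, None) is None: only the header check
  | head :: body :: rest =>
    if !PySem.Chars.startswith head ['>'] then false
    else if !pvIsSeqLine body then false
    else pvPairLoop rest

def is_valid_fasta_alt (sequence : String) : Bool :=
  let s := (PySem.Str.strip sequence).toList
  if !PySem.Chars.startswith s ['>'] then false
  else
    let lines := PySem.Chars.splitOn s ['\n']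
    if lines.length < 2 then false
    else pvPairLoop lines

-- ===== PRECONDITION & SPEC =====
def Spec_is_valid_fasta (sequence : String) (out : Bool) : Prop := out = is_valid_fasta_alt sequence
instance (sequence : String) (out : Bool) : Decidable (Spec_is_valid_fasta sequence out) := by unfold Spec_is_valid_fasta; infer_instance

-- ===== CLAIM (what is proved, stated in full; the proofs are below) =====
def Claim_equal_is_valid_fasta : Prop := ∀ (sequence : String), Dom_is_valid_fasta sequence → Spec_is_valid_fasta sequence (is_valid_fasta sequence)

-- ===== LEMMAS AND PROOFS =====

-- A line that starts with '>' is never a valid sequence line ('>' is not a nucleotide).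
theorem seqLine_false_of_gt (b : List Char)
    (h : PySem.Chars.startswith b ['>'] = true) : pvIsSeqLine b = false := by
  rw [PySem.Chars.startswith_iff] at h
  obtain ⟨t, rfl⟩ := h
  show (List.map PySem.Chars.upperChar ('>' :: t)).all _ = false
  rw [List.map_cons, List.all_cons]
  have h1 : (decide (PySem.Chars.upperChar '>' ∈ "ATGC\n\r".toList)) = false := by decide
  rw [h1, Bool.false_and]

-- A's toggle loop started with header = false equals B's pairwise loop.
theorem loopA_eq_pairLoop : ∀ (ls : List (List Char)), pvLoopA ls false = pvPairLoop ls
  | [] => rfl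
  | [a] => by
    cases ha : PySem.Chars.startswith a ['>'] <;>
      simp only [pvLoopA, pvPairLoop, ha, Bool.not_false, if_true, if_false,
        Bool.false_eq_true]
  | a :: b :: ls => by
    have ih := loopA_eq_pairLoop ls
    have eb : ((PySem.Chars.upper b).all (fun nuc => decide (nuc ∈ "ATGC\n\r".toList))) = pvIsSeqLine b := rfl
    cases ha : PySem.Chars.startswith a ['>']
    · simp only [pvLoopA, pvPairLoop, ha, Bool.not_false, reduceIte, Bool.false_eq_true]
    · cases hb : PySem.Chars.startswith b ['>']
      · cases hs : pvIsSeqLine b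
        · simp only [pvLoopA, pvPairLoop, ha, hb, eb, hs, Bool.not_false, Bool.not_true,
            reduceIte, Bool.false_eq_true]
        · simp only [pvLoopA, pvPairLoop, ha, hb, eb, hs, Bool.not_false, Bool.not_true,
            reduceIte, Bool.false_eq_true]
          exact ih
      · have hs := seqLine_false_of_gt b hb
        simp only [pvLoopA, pvPairLoop, ha, hb, eb, hs, Bool.not_false, Bool.not_true,
          reduceIte, Bool.false_eq_true]

-- ===== VERDICT (by name: the statement is the Claim_ definition above) =====
theorem is_valid_fasta_spec : Claim_equal_is_valid_fasta := by
  intro sequence _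
  unfold Spec_is_valid_fasta is_valid_fasta is_valid_fasta_alt
  simp only [loopA_eq_pairLoop]
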